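-- pv_equiv track=rewrite | github.com/abhishek18124/PyAug2025 | Lecture 25/002wines_problem_topdown.py | f_topdown
-- ===== SOURCE A (Python) =====
-- def f_topdown(p: list[int], i: int, j: int, y: int, dp: list[list[list[int]]]) -> int:
--     # lookup
--     if dp[i][j][y] != -1:
--         return dp[i][j][y]
--
--     # base case
--
--     if i == j:  # y == n
--         dp[i][j][y] = y * p[i]
--         return dp[i][j][y]
--
--     # recursive case
--
--     # f(i, j, y) = it is a fn that finds the max. profit we
--     # can make from wines[i...j] s.t. we are in year y
--
--     # decide for the yth year
--
--     # option 1 : sell the ith bottle of wine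
--
--     # option 2 : sell the jth bottle of wine
--
--     dp[i][j][y] = max(
--         y * p[i] + f_topdown(p, i + 1, j, y + 1, dp),
--         y * p[j] + f_topdown(p, i, j - 1, y + 1, dp),
--     )
--
--     return dp[i][j][y]
-- ===== SOURCE B (Python) =====
-- def f_topdown(p: list[int], i: int, j: int, y: int, dp: list[list[list[int]]]) -> int:
--     # Cached answer? return it; otherwise fill in bottom-up over spans with a
--     # rolling one-dimensional row (no recursion, O(span) extra memory).
--     v = dp[i][j][y]
--     if v != -1:
--         return v
--     span = j - i
--     prev = []
--     for s in range(span + 1):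
--         yy = y + span - s
--         cur = [yy * p[a] if s == 0
--                else max(yy * p[a] + prev[a - i + 1],
--                         yy * p[a + s] + prev[a - i])
--                for a in range(i, j - s + 1)]
--         prev = cur
--     return prev[0]
-- ===== Notes on version B (the rewrite author's own statement) =====
-- stated objective: alternative
-- what changed: Replaces memoized recursion that writes into dp with an iterative bottom-up sweep over spans keeping only a rolling one-dimensional row; Pre_ excludes tables whose queried cell is unset but whose interior reachable cells are pre-seeded with arbitrary non -1 values, where A echoes those seeds and recomputing from the prices is equally defensible; equivalence is about the return value only (A mutates dp, B does not).
import Mathlib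
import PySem

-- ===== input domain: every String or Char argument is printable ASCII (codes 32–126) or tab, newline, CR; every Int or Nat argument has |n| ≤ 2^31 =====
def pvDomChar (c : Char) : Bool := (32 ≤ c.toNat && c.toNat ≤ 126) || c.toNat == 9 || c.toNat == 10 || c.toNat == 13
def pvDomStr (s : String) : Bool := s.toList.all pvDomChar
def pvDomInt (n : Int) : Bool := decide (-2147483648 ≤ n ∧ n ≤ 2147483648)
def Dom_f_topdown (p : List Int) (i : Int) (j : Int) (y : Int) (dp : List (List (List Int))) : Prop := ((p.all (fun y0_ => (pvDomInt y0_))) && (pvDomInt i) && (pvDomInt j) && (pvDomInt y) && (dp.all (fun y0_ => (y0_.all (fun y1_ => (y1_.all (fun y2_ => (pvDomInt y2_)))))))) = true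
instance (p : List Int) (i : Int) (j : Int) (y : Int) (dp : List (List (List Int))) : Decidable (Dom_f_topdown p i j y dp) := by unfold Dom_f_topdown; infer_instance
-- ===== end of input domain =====

-- B replaces A's memoized recursion by an iterative bottom-up sweep over spans with
-- a rolling one-dimensional row. A mutates dp in place, B does not: the equivalence
-- proved here is about the RETURN value only.

-- shared lookup helper: dp[i][j][y] with Python index semantics (none = IndexError)
def pvGet3 (dp : List (List (List Int))) (i j y : Int) : Option Int :=
  (PySem.List.pyGet? dp i).bind fun r =>
    (PySem.List.pyGet? r j).bind fun c => PySem.List.pyGet? c y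

-- ===== PORT A =====
-- in-place write dp[i][j][y] = v; exact for nonnegative in-range indices, the only
-- writes Pre_ admits
def pvSet3 (dp : List (List (List Int))) (i j y : Int) (v : Int) : List (List (List Int)) :=
  if 0 ≤ i ∧ 0 ≤ j ∧ 0 ≤ y then
    dp.modify i.toNat (fun r => r.modify j.toNat (fun c => c.modify y.toNat (fun _ => v)))
  else dp

-- A's recursion, threading the mutated dp; fuel (span + 1) bounds the recursion
-- depth exactly on admitted inputs
def pvFA (p : List Int) : Nat → Int → Int → Int → List (List (List Int)) →
    Int × List (List (List Int))
  | 0, _, _, _, dp => (0, dp)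
  | fuel + 1, i, j, y, dp =>
    match pvGet3 dp i j y with
    | none => (0, dp)                       -- IndexError: outside Pre_
    | some v =>
      if v ≠ -1 then (v, dp)
      else if i = j then
        match PySem.List.pyGet? p i with
        | none => (0, dp)                   -- IndexError: outside Pre_
        | some pi =>
          let w := y * pi
          (w, pvSet3 dp i j y w)
      else
        match PySem.List.pyGet? p i, PySem.List.pyGet? p j with
        | some pi, some pj =>
          let r1 := pvFA p fuel (i + 1) j (y + 1) dp
          let r2 := pvFA p fuel i (j - 1) (y + 1) r1.2
          let m := max (y * pi + r1.1) (y * pj + r2.1)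
          (m, pvSet3 r2.2 i j y m)
        | _, _ => (0, dp)                   -- IndexError: outside Pre_

def f_topdown (p : List Int) (i : Int) (j : Int) (y : Int) (dp : List (List (List Int))) : Int :=
  (pvFA p ((j - i).toNat + 1) i j y dp).1

-- ===== PORT B =====
-- one sweep step: the row for span s computed from the row for span s - 1
-- (prev / p lookups are in range on every admitted input; pyGetD's default is inert there)
def pvStep (p : List Int) (i j y : Int) (prev : List Int) (s : Int) : List Int :=
  (PySem.List.pyRange i (j - s + 1) 1).map (fun a =>
    if s = 0 then (y + (j - i) - s) * PySem.List.pyGetD p a 0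
    else max ((y + (j - i) - s) * PySem.List.pyGetD p a 0 + PySem.List.pyGetD prev (a - i + 1) 0)
             ((y + (j - i) - s) * PySem.List.pyGetD p (a + s) 0 + PySem.List.pyGetD prev (a - i) 0))

def f_topdown_alt (p : List Int) (i : Int) (j : Int) (y : Int) (dp : List (List (List Int))) : Int :=
  match pvGet3 dp i j y with
  | none => 0                               -- IndexError: outside Pre_
  | some v =>
    if v ≠ -1 then v
    else
      let span := j - i
      let prev := (PySem.List.pyRange 0 (span + 1) 1).foldl (pvStep p i j y) []
      PySem.List.pyGetD prev 0 0

-- ===== PRECONDITION & SPEC =====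
-- proof-side cell lookup at Nat indices (used by Pre_ below and the lemmas)
def pvG3 (dp : List (List (List Int))) (a b yy : Nat) : Option Int :=
  dp[a]?.bind fun r => r[b]?.bind fun col => col[yy]?

-- Pre_ admits inputs whose queried cell is already set (both programs return it) or a
-- genuine subproblem over a fresh memo region (every reachable cell present and -1);
-- it excludes out-of-range indices, on which A raises IndexError, and tables whose
-- queried cell is unset but whose interior reachable cells carry arbitrary non -1
-- values: there A echoes those seeded values while recomputing from the prices is
-- equally defensible, so neither value is the one to specify.
def Pre_f_topdown (p : List Int) (i : Int) (j : Int) (y : Int) (dp : List (List (List Int))) : Prop :=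
  (pvGet3 dp i j y).getD (-1) ≠ -1 ∨
  (0 ≤ i ∧ i ≤ j ∧ j < (p.length : Int) ∧ 0 ≤ y ∧
    ∀ a ∈ List.range' i.toNat (j.toNat - i.toNat + 1),
      ∀ b ∈ List.range' a (j.toNat - a + 1),
        pvG3 dp a b (y + (j - i) - ((b : Int) - (a : Int))).toNat = some (-1))
instance (p : List Int) (i : Int) (j : Int) (y : Int) (dp : List (List (List Int))) : Decidable (Pre_f_topdown p i j y dp) := by unfold Pre_f_topdown; infer_instance

def pvWitness_f_topdown : List Int × Int × Int × Int × List (List (List Int)) :=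
  ([1, 2], 0, 1, 1, [[[-1, -1, -1], [-1, -1, -1]], [[-1, -1, -1], [-1, -1, -1]]])

def Spec_f_topdown (p : List Int) (i : Int) (j : Int) (y : Int) (dp : List (List (List Int))) (out : Int) : Prop := out = f_topdown_alt p i j y dp
instance (p : List Int) (i : Int) (j : Int) (y : Int) (dp : List (List (List Int))) (out : Int) : Decidable (Spec_f_topdown p i j y dp out) := by unfold Spec_f_topdown; infer_instance

-- ===== CLAIM (what is proved, stated in full; the proofs are below) =====
def Claim_equal_f_topdown : Prop := ∀ (p : List Int) (i : Int) (j : Int) (y : Int) (dp : List (List (List Int))), Dom_f_topdown p i j y dp → Pre_f_topdown p i j y dp → Spec_f_topdown p i j y dp (f_topdown p i j y dp)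

-- ===== LEMMAS AND PROOFS =====

-- the wine value: max profit from a window of span s starting at index a in year yy
def pvW (p : List Int) : Nat → Int → Int → Int
  | 0, a, yy => yy * PySem.List.pyGetD p a 0
  | s + 1, a, yy =>
    max (yy * PySem.List.pyGetD p a 0 + pvW p s (a + 1) (yy + 1))
        (yy * PySem.List.pyGetD p (a + (s : Int) + 1) 0 + pvW p s a (yy + 1))

theorem pvGet3_eq_pvG3 (dp : List (List (List Int))) (i j y : Int)
    (hi : 0 ≤ i) (hj : 0 ≤ j) (hy : 0 ≤ y) :
    pvGet3 dp i j y = pvG3 dp i.toNat j.toNat y.toNat := by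
  simp [pvGet3, pvG3, PySem.List.pyGet?_of_nonneg, hi, hj, hy]

theorem pvG3_set3 (dp : List (List (List Int))) (i j y : Int)
    (hi : 0 ≤ i) (hj : 0 ≤ j) (hy : 0 ≤ y) (v : Int) (a b yy : Nat) :
    pvG3 (pvSet3 dp i j y v) a b yy =
      if a = i.toNat ∧ b = j.toNat ∧ yy = y.toNat then (pvG3 dp a b yy).map (fun _ => v)
      else pvG3 dp a b yy := by
  unfold pvG3 pvSet3
  rw [if_pos ⟨hi, hj, hy⟩]
  simp only [List.getElem?_modify]
  cases hr : dp[a]? with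
  | none => simp [hr]
  | some r =>
    by_cases ha : i.toNat = a
    · simp only [hr, ha, if_pos rfl, Option.map_some, Option.bind_some,
        List.getElem?_modify]
      cases hc : r[b]? with
      | none => simp [List.getElem?_modify, hc, ha, eq_comm]
      | some col =>
        by_cases hb : j.toNat = b
        · simp only [hc, hb, if_pos rfl, Option.map_some, Option.bind_some,
            List.getElem?_modify]
          cases hv : col[yy]? with
          | none => simp [List.getElem?_modify, hc, hv, ha, hb, eq_comm]
          | some w =>
            by_cases hyy : y.toNat = yy
            · simp [List.getElem?_modify, hc, hv, ha, hb, hyy, eq_comm]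
            · simp [List.getElem?_modify, hc, hv, ha, hb, hyy, eq_comm, Ne.symm hyy]
        · simp [List.getElem?_modify, hc, ha, hb, eq_comm, Ne.symm hb]
    · simp [hr, ha, eq_comm, Ne.symm ha]

-- dp agrees with a fresh table except that some cells already hold their pvW value
def pvInv (p : List Int) (I J : Nat) (Y : Int) (dp : List (List (List Int))) : Prop :=
  ∀ a b : Nat, I ≤ a → a ≤ b → b ≤ J →
    pvG3 dp a b (Y - ((b : Int) - (a : Int))).toNat = some (-1) ∨
    pvG3 dp a b (Y - ((b : Int) - (a : Int))).toNat =
      some (pvW p (b - a) (a : Int) (Y - ((b : Int) - (a : Int))))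

theorem pvInv_set (p : List Int) (I J : Nat) (Y : Int) (a b : Nat)
    (haI : I ≤ a) (hab : a ≤ b) (hbJ : b ≤ J) (hY : 0 ≤ Y - ((J : Int) - (I : Int)))
    (dp : List (List (List Int))) (hinv : pvInv p I J Y dp) :
    pvInv p I J Y (pvSet3 dp (a : Int) (b : Int) (Y - ((b : Int) - (a : Int)))
      (pvW p (b - a) (a : Int) (Y - ((b : Int) - (a : Int))))) := by
  intro a' b' ha' hab' hb'
  rw [pvG3_set3 _ _ _ _ (by exact_mod_cast Int.natCast_nonneg a)
    (by exact_mod_cast Int.natCast_nonneg b) (by omega)]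
  simp only [Int.toNat_natCast]
  split_ifs with h
  · obtain ⟨h1, h2, _⟩ := h
    rw [h1, h2]
    rcases hinv a b haI hab hbJ with hc | hc <;> rw [hc] <;> right <;> rfl
  · exact hinv a' b' ha' hab' hb'

theorem pvFA_W (p : List Int) (I J : Nat) (Y : Int)
    (hp : (J : Int) < (p.length : Int)) (hY : 0 ≤ Y - ((J : Int) - (I : Int))) :
    ∀ fuel : Nat, ∀ a b : Nat, ∀ dp : List (List (List Int)),
      pvInv p I J Y dp → I ≤ a → a ≤ b → b ≤ J → b - a < fuel →
      (pvFA p fuel (a : Int) (b : Int) (Y - ((b : Int) - (a : Int))) dp).1 =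
          pvW p (b - a) (a : Int) (Y - ((b : Int) - (a : Int))) ∧
        pvInv p I J Y (pvFA p fuel (a : Int) (b : Int) (Y - ((b : Int) - (a : Int))) dp).2 := by
  intro fuel
  induction fuel with
  | zero => intro a b dp _ _ _ _ hlt; omega
  | succ fuel ih =>
    intro a b dp hinv haI hab hbJ hlt
    have hy0 : (0 : Int) ≤ Y - ((b : Int) - (a : Int)) := by omega
    have hget : pvGet3 dp (a : Int) (b : Int) (Y - ((b : Int) - (a : Int))) =
        pvG3 dp a b (Y - ((b : Int) - (a : Int))).toNat := by
      rw [pvGet3_eq_pvG3 _ _ _ _ (by exact_mod_cast Int.natCast_nonneg a)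
        (by exact_mod_cast Int.natCast_nonneg b) hy0]
      simp
    have hpa : PySem.List.pyGet? p (a : Int) = some (PySem.List.pyGetD p (a : Int) 0) := by
      rw [PySem.List.pyGet?_eq_some_getElem _ (by exact_mod_cast Int.natCast_nonneg a) (by omega),
        PySem.List.pyGetD_eq_getElem _ _ (by exact_mod_cast Int.natCast_nonneg a) (by omega)]
    have hpb : PySem.List.pyGet? p (b : Int) = some (PySem.List.pyGetD p (b : Int) 0) := by
      rw [PySem.List.pyGet?_eq_some_getElem _ (by exact_mod_cast Int.natCast_nonneg b) (by omega),
        PySem.List.pyGetD_eq_getElem _ _ (by exact_mod_cast Int.natCast_nonneg b) (by omega)]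
    have hcases : (pvG3 dp a b (Y - ((b : Int) - (a : Int))).toNat =
          some (pvW p (b - a) (a : Int) (Y - ((b : Int) - (a : Int)))) ∧
          pvW p (b - a) (a : Int) (Y - ((b : Int) - (a : Int))) ≠ -1) ∨
        pvG3 dp a b (Y - ((b : Int) - (a : Int))).toNat = some (-1) := by
      rcases hinv a b haI hab hbJ with hc | hc
      · right; exact hc
      · by_cases hneg : pvW p (b - a) (a : Int) (Y - ((b : Int) - (a : Int))) = -1
        · right; rw [hneg] at hc; exact hc
        · left; exact ⟨hc, hneg⟩
    rcases hcases with ⟨hc, hne⟩ | hc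
    · -- memo hit: the stored value is returned unchanged
      simp only [pvFA, hget, hc]
      simp [hne]
      exact hinv
    · -- fresh (or -1-valued) cell: the port recomputes
      by_cases heq : a = b
      · subst heq
        have h0 : a - a = 0 := by omega
        have h2 := pvInv_set p I J Y a a haI le_rfl hbJ hY dp hinv
        simp only [sub_self, sub_zero, h0] at hget hc h2 ⊢
        simp only [pvFA, hget, hc]
        norm_num [hpa]
        constructor
        · simp [pvW, List.getD_eq_getElem?_getD]
        · simpa [pvW, List.getD_eq_getElem?_getD] using h2
      · have hlt2 : a < b := lt_of_le_of_ne hab heq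
        have hne : ((a : Int)) ≠ (b : Int) := by exact_mod_cast heq
        have hr1 := ih (a + 1) b dp hinv (by omega) (by omega) hbJ (by omega)
        have hr2 := ih a (b - 1) (pvFA p fuel (((a + 1 : Nat)) : Int) (b : Int)
            (Y - ((b : Int) - (((a + 1 : Nat)) : Int))) dp).2 hr1.2 haI (by omega) (by omega)
            (by omega)
        have e1a : ((a : Int)) + 1 = (((a + 1 : Nat)) : Int) := by omega
        have e1y : Y - ((b : Int) - (a : Int)) + 1 = Y - ((b : Int) - (((a + 1 : Nat)) : Int)) := by
          omega
        have e2b : ((b : Int)) - 1 = (((b - 1 : Nat)) : Int) := by omega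
        have e2y : Y - ((b : Int) - (a : Int)) + 1 = Y - ((((b - 1 : Nat)) : Int) - (a : Int)) := by
          omega
        have hres : max ((Y - ((b : Int) - (a : Int))) * PySem.List.pyGetD p (a : Int) 0 +
              pvW p (b - (a + 1)) (((a + 1 : Nat)) : Int) (Y - ((b : Int) - (((a + 1 : Nat)) : Int))))
            ((Y - ((b : Int) - (a : Int))) * PySem.List.pyGetD p (b : Int) 0 +
              pvW p (b - 1 - a) (a : Int) (Y - ((((b - 1 : Nat)) : Int) - (a : Int)))) =
            pvW p (b - a) (a : Int) (Y - ((b : Int) - (a : Int))) := by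
          have hspan : b - a = (b - a - 1) + 1 := by omega
          rw [hspan, pvW]
          have g1 : b - (a + 1) = b - a - 1 := by omega
          have g2 : b - 1 - a = b - a - 1 := by omega
          have g3 : (((a + 1 : Nat)) : Int) = (a : Int) + 1 := by omega
          have g4 : Y - ((b : Int) - (((a + 1 : Nat)) : Int)) = Y - ((b : Int) - (a : Int)) + 1 := by
            omega
          have g5 : Y - ((((b - 1 : Nat)) : Int) - (a : Int)) = Y - ((b : Int) - (a : Int)) + 1 := by
            omega
          have g6 : (a : Int) + ((b - a - 1 : Nat) : Int) + 1 = (b : Int) := by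
            omega
          rw [g1, g2, g4, g5, g6, g3]
        rw [← e1y, ← e1a] at hr1
        rw [← e2y, ← e1y, ← e2b, ← e1a] at hr2
        rw [← e2y, ← e1y, ← e1a] at hres
        simp only [pvFA, hget, hc, hpa, hpb]
        rw [if_neg (show ¬((-1 : Int) ≠ -1) by simp), if_neg hne]
        rw [hr1.1, hr2.1, hres]
        exact ⟨rfl, pvInv_set p I J Y a b haI hab hbJ hY _ hr2.2⟩

-- B's sweep: after span s the rolling row holds the pvW values of all span-s windows
theorem pvStep_row (p : List Int) (i j y : Int) (hij : i ≤ j) :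
    ∀ s : Nat, (s : Int) ≤ j - i →
      ((PySem.List.pyRange 0 ((s : Int) + 1) 1).foldl (pvStep p i j y) []) =
        (PySem.List.pyRange i (j - (s : Int) + 1) 1).map
          (fun a => pvW p s a (y + (j - i) - (s : Int))) := by
  intro s
  induction s with
  | zero =>
    intro _
    have h0 : PySem.List.pyRange 0 (((0 : Nat) : Int) + 1) 1 = [0] := by
      norm_num [PySem.List.pyRange_one]
    rw [h0]
    simp only [List.foldl_cons, List.foldl_nil, pvStep, pvW]
    norm_num
  | succ s ih =>
    intro hs
    have hc : (((s + 1 : Nat)) : Int) = (s : Int) + 1 := by push_cast; ring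
    rw [hc, PySem.List.pyRange_one_succ_right (by positivity), List.foldl_append,
      List.foldl_cons, List.foldl_nil, ih (by omega)]
    unfold pvStep
    apply List.map_congr_left
    intro a hmem
    rw [PySem.List.mem_pyRange_one] at hmem
    have hs1 : ¬ ((s : Int) + 1 = 0) := by omega
    rw [if_neg hs1]
    have hk1 : a - i = (((a - i).toNat : Nat) : Int) := by omega
    have hk2 : a - i + 1 = ((((a - i).toNat + 1 : Nat)) : Int) := by omega
    rw [hk2, hk1,
      PySem.List.pyGetD_map_pyRange_one _ _ _ _ _ (by omega),
      PySem.List.pyGetD_map_pyRange_one _ _ _ _ _ (by omega)]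
    simp only [Int.toNat_natCast]
    have he1 : i + (((a - i).toNat + 1 : Nat) : Int) = a + 1 := by omega
    have he2 : i + (((a - i).toNat : Nat) : Int) = a := by omega
    rw [he1, he2, pvW]
    have hy1 : y + (j - i) - (s : Int) = (y + (j - i) - ((s : Int) + 1)) + 1 := by ring
    rw [hy1]
    have hp : a + ((s : Int) + 1) = a + (s : Int) + 1 := by ring
    rw [hp]

theorem alt_eq_W (p : List Int) (i j y : Int) (dp : List (List (List Int)))
    (hij : i ≤ j) (htop : pvGet3 dp i j y = some (-1)) :
    f_topdown_alt p i j y dp = pvW p (j - i).toNat i y := by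
  have hrow := pvStep_row p i j y hij (j - i).toNat (by omega)
  have hcast : j - i = (((j - i).toNat : Nat) : Int) := by omega
  unfold f_topdown_alt
  rw [htop]
  norm_num
  rw [hcast, hrow]
  simp only [Int.toNat_natCast]
  rw [show j - (((j - i).toNat : Nat) : Int) + 1 = i + 1 from by omega,
    PySem.List.pyRange_one_singleton, List.map_cons, List.map_nil,
    PySem.List.pyGetD_zero_cons,
    show y + (j - i) - (((j - i).toNat : Nat) : Int) = y from by omega]

-- ===== VERDICT (by name: the statement is the Claim_ definition above) =====
theorem f_topdown_spec : Claim_equal_f_topdown := by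
  intro p i j y dp _ hpre
  unfold Spec_f_topdown
  rcases hpre with h1 | ⟨hi, hij, hjp, hy, hfresh⟩
  · -- the queried cell is already set: both programs return it at once
    cases hc : pvGet3 dp i j y with
    | none => rw [hc] at h1; simp at h1
    | some v =>
      rw [hc] at h1; simp at h1
      simp [f_topdown, f_topdown_alt, pvFA, hc, h1]
  · -- fresh memo region: both programs compute the wine value pvW
    have hinv0 : pvInv p i.toNat j.toNat (y + (j - i)) dp := by
      intro a b haI hab hbJ
      left
      exact hfresh a (List.mem_range'_1.2 ⟨haI, by omega⟩)
        b (List.mem_range'_1.2 ⟨hab, by omega⟩)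
    have htop : pvGet3 dp i j y = some (-1) := by
      have hm := hfresh i.toNat (List.mem_range'_1.2 ⟨le_rfl, by omega⟩)
        j.toNat (List.mem_range'_1.2 ⟨by omega, by omega⟩)
      rw [pvGet3_eq_pvG3 _ _ _ _ hi (le_trans hi hij) hy]
      rw [show y + (j - i) - (((j.toNat : Nat) : Int) - ((i.toNat : Nat) : Int)) = y from by omega]
        at hm
      exact hm
    have hA := pvFA_W p i.toNat j.toNat (y + (j - i)) (by omega) (by omega)
      ((j - i).toNat + 1) i.toNat j.toNat dp hinv0 le_rfl (by omega) le_rfl (by omega)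
    have e1 : ((i.toNat : Nat) : Int) = i := by omega
    have e2 : ((j.toNat : Nat) : Int) = j := by omega
    rw [e1, e2] at hA
    rw [show y + (j - i) - (j - i) = y from by ring] at hA
    rw [show j.toNat - i.toNat = (j - i).toNat from by omega] at hA
    rw [alt_eq_W p i j y dp hij htop]
    exact hA.1
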